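-- pv_equiv track=rewrite | github.com/ogzvatansever/advent-of-code | 2015/day5.py | isitnice
-- ===== SOURCE A (Python) =====
-- vowels = ["a","e","i","o","u"]
--
-- def isitnice(a) :
--     vowels_num = 0
--     doubleletter = 0
--     for i in a :
--
--         if i in vowels :
--             vowels_num += 1
--
--     for s in range(1,len(a)) :
--         if a[s] == a[s-1] :
--             doubleletter += 1
--
--     if vowels_num < 3 :
--         return False
--
--     if 'ab' in a or 'cd' in a or 'pq' in a or 'xy' in a :
--         return False
--
--     if doubleletter >= 1 :
--         return True
--     else :
--         return False
-- ===== SOURCE B (Python) =====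
-- def isitnice(a):
--     vowel_count = 0
--     has_double = False
--     has_bad = False
--     prev = None
--     for c in a:
--         if c in "aeiou":
--             vowel_count += 1
--         if prev is not None:
--             if c == prev:
--                 has_double = True
--             if prev + c in ("ab", "cd", "pq", "xy"):
--                 has_bad = True
--         prev = c
--     return vowel_count >= 3 and has_double and not has_bad
-- ===== Notes on version B (the rewrite author's own statement) =====
-- stated objective: alternative
-- what changed: A's three separate scans (vowel-count loop, index-based adjacent-pair loop, four substring tests) are merged into one left-to-right pass that keeps a previous-character variable and three pieces of state (vowel count, has_double flag, has_bad flag).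
import Mathlib
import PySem

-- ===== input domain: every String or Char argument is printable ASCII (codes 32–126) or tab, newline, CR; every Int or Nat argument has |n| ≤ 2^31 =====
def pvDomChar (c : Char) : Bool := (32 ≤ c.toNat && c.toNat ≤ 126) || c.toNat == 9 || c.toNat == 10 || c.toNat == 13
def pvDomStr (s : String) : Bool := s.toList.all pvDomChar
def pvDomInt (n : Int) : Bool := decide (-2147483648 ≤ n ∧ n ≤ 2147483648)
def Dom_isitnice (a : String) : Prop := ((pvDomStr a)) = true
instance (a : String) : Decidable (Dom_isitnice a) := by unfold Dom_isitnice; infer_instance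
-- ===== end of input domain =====

-- B merges A's three separate scans into one left-to-right pass that keeps a previous-character
-- variable and three pieces of state (vowel count, double flag, bad-pair flag).

-- ===== PORT A =====
def pvVowels : List Char := ['a', 'e', 'i', 'o', 'u']

def isitnice (a : String) : Bool :=
  let vowels_num : Int := a.toList.foldl (fun n i => if pvVowels.contains i then n + 1 else n) 0
  let doubleletter : Int :=
    (PySem.List.pyRange 1 (PySem.Str.len a) 1).foldl
      (fun d s => if PySem.Str.pyGet? a s = PySem.Str.pyGet? a (s - 1) then d + 1 else d) 0
  if vowels_num < 3 then false
  else if PySem.Str.isIn "ab" a || PySem.Str.isIn "cd" a ||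
          PySem.Str.isIn "pq" a || PySem.Str.isIn "xy" a then false
  else if doubleletter ≥ 1 then true else false

-- ===== PORT B =====
def pvBadPair (p c : Char) : Bool :=
  (p == 'a' && c == 'b') || (p == 'c' && c == 'd') ||
  (p == 'p' && c == 'q') || (p == 'x' && c == 'y')

def pvGoB : Option Char → Int → Bool → Bool → List Char → Bool
  | _, v, hd, hb, [] => decide (3 ≤ v) && hd && !hb
  | prev, v, hd, hb, c :: rest =>
    let v' := if ("aeiou".toList.contains c) then v + 1 else v
    let hd' := hd || (match prev with | some p => p == c | none => false)
    let hb' := hb || (match prev with | some p => pvBadPair p c | none => false)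
    pvGoB (some c) v' hd' hb' rest

def isitnice_alt (a : String) : Bool := pvGoB none 0 false false a.toList

-- ===== PRECONDITION & SPEC =====
def Spec_isitnice (a : String) (out : Bool) : Prop := out = isitnice_alt a
instance (a : String) (out : Bool) : Decidable (Spec_isitnice a out) := by unfold Spec_isitnice; infer_instance

-- ===== CLAIM (what is proved, stated in full; the proofs are below) =====
def Claim_equal_isitnice : Prop := ∀ (a : String), Dom_isitnice a → Spec_isitnice a (isitnice a)

-- ===== LEMMAS AND PROOFS =====

-- spec-level helpers used only by the proofs
def pvCnt (cs : List Char) : Int := (cs.countP (fun c => pvVowels.contains c) : Int)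

def pvDbl : List Char → Bool
  | [] => false
  | [_] => false
  | c1 :: c2 :: r => (c1 == c2) || pvDbl (c2 :: r)

def pvBad : List Char → Bool
  | [] => false
  | [_] => false
  | c1 :: c2 :: r => pvBadPair c1 c2 || pvBad (c2 :: r)

lemma pvCnt_cons (c : Char) (rest : List Char) :
    pvCnt (c :: rest) = pvCnt rest + (if pvVowels.contains c then 1 else 0) := by
  simp only [pvCnt, List.countP_cons]
  by_cases h : pvVowels.contains c = true <;> simp [h]

-- B's one-pass invariant
lemma pvGoB_spec (cs : List Char) : ∀ (prev : Option Char) (v : Int) (hd hb : Bool),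
    pvGoB prev v hd hb cs =
      (decide (3 ≤ v + pvCnt cs)
        && (hd || (match prev with | some p => pvDbl (p :: cs) | none => pvDbl cs))
        && !(hb || (match prev with | some p => pvBad (p :: cs) | none => pvBad cs))) := by
  induction cs with
  | nil =>
    intro prev v hd hb
    cases prev <;> simp [pvGoB, pvCnt, pvDbl, pvBad]
  | cons c rest ih =>
    intro prev v hd hb
    have hA : ("aeiou".toList.contains c) = pvVowels.contains c := rfl
    have hcnt : ∀ w : Int, decide (3 ≤ (if pvVowels.contains c then w + 1 else w) + pvCnt rest)
        = decide (3 ≤ w + pvCnt (c :: rest)) := by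
      intro w
      rw [pvCnt_cons, decide_eq_decide]
      by_cases h : c ∈ pvVowels <;> simp [h] <;> omega
    cases prev with
    | none =>
      show pvGoB (some c) _ _ _ rest = _
      rw [ih]
      simp only [hA, hcnt, Bool.or_false]
    | some p =>
      show pvGoB (some c) _ _ _ rest = _
      rw [ih]
      simp only [hA, hcnt]
      simp [pvDbl, pvBad, Bool.or_assoc]

-- A's vowel fold
lemma pvFold_cnt (cs : List Char) : ∀ (v : Int),
    cs.foldl (fun n i => if pvVowels.contains i then n + 1 else n) v = v + pvCnt cs := by
  induction cs with
  | nil => intro v; simp [pvCnt]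
  | cons c rest ih =>
    intro v
    simp only [List.foldl_cons, ih, pvCnt_cons]
    by_cases h : c ∈ pvVowels <;> simp [h] <;> omega

-- a conditional-increment fold is a countP
lemma pvFoldCount (P : Int → Prop) [DecidablePred P] : ∀ (l : List Int) (acc : Int),
    l.foldl (fun d s => if P s then d + 1 else d) acc
      = acc + (l.countP (fun s => decide (P s)) : Int) := by
  intro l
  induction l with
  | nil => intro acc; simp
  | cons x xs ih =>
    intro acc
    simp only [List.foldl_cons, List.countP_cons, ih]
    by_cases h : P x <;> simp [h] <;> push_cast <;> ring

-- pvDbl holds iff some adjacent pair is equal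
lemma pvDbl_iff (cs : List Char) :
    pvDbl cs = true ↔ ∃ (i : Nat) (h : i + 1 < cs.length), cs[i + 1] = cs[i] := by
  induction cs using pvDbl.induct with
  | case1 => simp [pvDbl]
  | case2 c =>
    simp only [pvDbl]
    constructor
    · intro h; exact absurd h (by simp)
    · rintro ⟨i, hi, -⟩; simp at hi
  | case3 c1 c2 r ih =>
    simp only [pvDbl, Bool.or_eq_true, beq_iff_eq, ih]
    constructor
    · rintro (h | ⟨i, hi, he⟩)
      · exact ⟨0, by simp, by simp [h]⟩
      · refine ⟨i + 1, by simp at hi ⊢; omega, ?_⟩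
        simpa using he
    · rintro ⟨i, hi, he⟩
      cases i with
      | zero => left; simpa using he.symm
      | succ j =>
        right
        refine ⟨j, by simp at hi ⊢; omega, ?_⟩
        simpa using he

-- A's double-letter fold is positive iff pvDbl
lemma pvFold_dbl (cs : List Char) :
    ((PySem.List.pyRange 1 (cs.length : Int) 1).foldl
      (fun d s => if PySem.List.pyGet? cs s = PySem.List.pyGet? cs (s - 1) then d + 1 else d)
      (0 : Int) ≥ 1) ↔ pvDbl cs = true := by
  rw [pvFoldCount (fun s => PySem.List.pyGet? cs s = PySem.List.pyGet? cs (s - 1)), pvDbl_iff]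
  constructor
  · intro h
    have hpos : 0 < (PySem.List.pyRange 1 (cs.length : Int) 1).countP
        (fun s => decide (PySem.List.pyGet? cs s = PySem.List.pyGet? cs (s - 1))) := by omega
    obtain ⟨s, hs, hP⟩ := List.countP_pos_iff.mp hpos
    rw [PySem.List.mem_pyRange_one] at hs
    simp only [decide_eq_true_eq] at hP
    obtain ⟨hs1, hs2⟩ := hs
    have h1 : (0:Int) ≤ s := by omega
    have h2 : (0:Int) ≤ s - 1 := by omega
    rw [PySem.List.pyGet?_of_nonneg _ h1, PySem.List.pyGet?_of_nonneg _ h2] at hP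
    have hlt2 : (s - 1).toNat < cs.length := by omega
    refine ⟨(s - 1).toNat, by omega, ?_⟩
    have hq : cs[(s - 1).toNat + 1]? = cs[(s - 1).toNat]? := by
      rw [show (s - 1).toNat + 1 = s.toNat from by omega]
      exact hP
    have hlt3 : (s - 1).toNat + 1 < cs.length := by omega
    rw [List.getElem?_eq_getElem hlt3, List.getElem?_eq_getElem hlt2] at hq
    exact Option.some.inj hq
  · rintro ⟨i, hi, he⟩
    have hmem : ((i : Int) + 1) ∈ PySem.List.pyRange 1 (cs.length : Int) 1 := by
      rw [PySem.List.mem_pyRange_one]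
      constructor <;> [omega; (push_cast; omega)]
    have hP : decide (PySem.List.pyGet? cs ((i : Int) + 1)
        = PySem.List.pyGet? cs ((i : Int) + 1 - 1)) = true := by
      simp only [decide_eq_true_eq]
      have e1 : ((i : Int) + 1) = ((i + 1 : Nat) : Int) := by push_cast; ring
      rw [e1]
      have e2 : (((i + 1 : Nat) : Int) - 1) = ((i : Nat) : Int) := by push_cast; ring
      rw [e2, PySem.List.pyGet?_natCast, PySem.List.pyGet?_natCast]
      rw [List.getElem?_eq_getElem hi, List.getElem?_eq_getElem (by omega)]
      exact congrArg some he
    have : 0 < (PySem.List.pyRange 1 (cs.length : Int) 1).countP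
        (fun s => decide (PySem.List.pyGet? cs s = PySem.List.pyGet? cs (s - 1))) :=
      List.countP_pos_iff.mpr ⟨(i : Int) + 1, hmem, hP⟩
    omega

-- a two-character list is an infix of a cons-cons iff it matches at the head or is an infix of the tail
lemma pvPair_infix (p q c1 c2 : Char) (r : List Char) :
    ([p, q] <:+: c1 :: c2 :: r) ↔ ((c1 = p ∧ c2 = q) ∨ [p, q] <:+: c2 :: r) := by
  rw [List.infix_cons_iff]
  constructor
  · rintro (hpre | h)
    · left
      rw [List.cons_prefix_cons] at hpre
      obtain ⟨h1, h2⟩ := hpre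
      rw [List.cons_prefix_cons] at h2
      exact ⟨h1.symm, h2.1.symm⟩
    · right; exact h
  · rintro (⟨h1, h2⟩ | h)
    · left; simp [List.cons_prefix_cons, h1, h2]
    · right; exact h

-- pvBad holds iff one of the four forbidden pairs is an infix
set_option maxHeartbeats 1000000 in
lemma pvBad_iff_infix (cs : List Char) :
    pvBad cs = true ↔ (['a','b'] <:+: cs ∨ ['c','d'] <:+: cs ∨ ['p','q'] <:+: cs ∨ ['x','y'] <:+: cs) := by
  induction cs using pvBad.induct with
  | case1 => simp [pvBad]
  | case2 c => simp [pvBad, List.infix_cons_iff, List.cons_prefix_cons]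
  | case3 c1 c2 r ih =>
    simp only [pvBad, Bool.or_eq_true, ih, pvPair_infix, pvBadPair,
      Bool.and_eq_true, beq_iff_eq]
    tauto

lemma pvBad_iff (a : String) :
    (PySem.Str.isIn "ab" a || PySem.Str.isIn "cd" a ||
     PySem.Str.isIn "pq" a || PySem.Str.isIn "xy" a) = pvBad a.toList := by
  rw [Bool.eq_iff_iff]
  simp only [Bool.or_eq_true, PySem.Str.isIn_iff_infix, pvBad_iff_infix]
  tauto

-- ===== VERDICT (by name: the statement is the Claim_ definition above) =====
theorem isitnice_spec : Claim_equal_isitnice := by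
  intro a _
  show isitnice a = isitnice_alt a
  have hB : isitnice_alt a
      = (decide (3 ≤ pvCnt a.toList) && pvDbl a.toList && !pvBad a.toList) := by
    show pvGoB none 0 false false a.toList = _
    rw [pvGoB_spec]
    simp
  rw [hB]
  simp only [isitnice, PySem.Str.pyGet?_eq, PySem.Chars.pyGet?_eq_listPyGet?, PySem.Str.len_eq,
    pvFold_cnt a.toList 0, zero_add, pvBad_iff]
  split_ifs with h1 h2 h3
  · have : ¬ (3 ≤ pvCnt a.toList) := by omega
    simp [this]
  · simp [h2]
  · have hd : pvDbl a.toList = true := (pvFold_dbl a.toList).mp h3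
    have h3' : 3 ≤ pvCnt a.toList := by omega
    simp [h2, hd, h3']
  · have hd : pvDbl a.toList = false := by
      rcases hh : pvDbl a.toList
      · rfl
      · exact absurd ((pvFold_dbl a.toList).mpr hh) h3
    simp [hd]
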